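-- pv_equiv track=rewrite | github.com/JimmyBillen/advent-of-code-2024 | day07.py | permutation_calc
-- ===== SOURCE A (Python) =====
-- def permutation_calc(values: list[int], operator_perm: list[str]) -> int:
--     """Apply operators on the values."""
--     calc_val = values[0]
--     for operator, value in zip(operator_perm, values[1:]):
--         if operator == '+':
--             calc_val += value
--         if operator ==  '*':
--             calc_val *= value
--         if operator == '||':
--             calc_val = int(str(calc_val)+str(value))
--     return calc_val
-- ===== SOURCE B (Python) =====
-- def permutation_calc(values: list[int], operator_perm: list[str]) -> int:
--     """Apply operators on the values (staged: compile to closures, then run them)."""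
--     # pass 1: compile the operator sequence into a list of unary step functions,
--     # dropping unrecognised operators entirely
--     steps = []
--     for op, v in zip(operator_perm, values[1:]):
--         if op == '+':
--             steps.append(lambda acc, v=v: acc + v)
--         elif op == '*':
--             steps.append(lambda acc, v=v: acc * v)
--         elif op == '||':
--             steps.append(lambda acc, v=v: int(str(acc) + str(v)))
--     # pass 2: run the compiled pipeline on the seed value
--     acc = values[0]
--     for step in steps:
--         acc = step(acc)
--     return acc
-- ===== Notes on version B (the rewrite author's own statement) =====
-- stated objective: alternative
-- what changed: B is staged: a first pass compiles the operator sequence into a list of unary closures (unrecognised operators are dropped at compile time, so the run pass never sees them), and a second pass threads the seed value through that closure list, instead of A's single loop testing three ifs per pair.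
import Mathlib
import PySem

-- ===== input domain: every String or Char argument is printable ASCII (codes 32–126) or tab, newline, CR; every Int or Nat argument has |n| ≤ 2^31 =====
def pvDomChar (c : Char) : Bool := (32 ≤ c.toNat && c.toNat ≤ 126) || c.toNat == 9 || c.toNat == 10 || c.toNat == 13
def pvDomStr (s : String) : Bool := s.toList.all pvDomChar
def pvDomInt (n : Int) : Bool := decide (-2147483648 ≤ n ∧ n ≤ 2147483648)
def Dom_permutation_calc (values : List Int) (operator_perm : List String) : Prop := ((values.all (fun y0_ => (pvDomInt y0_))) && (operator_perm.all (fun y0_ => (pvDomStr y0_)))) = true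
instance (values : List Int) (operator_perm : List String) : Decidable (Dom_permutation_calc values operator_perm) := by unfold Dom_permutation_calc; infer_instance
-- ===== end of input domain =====

-- B is staged — a compile pass turns the operator sequence into a list of unary closures
-- (dropping unrecognised operators), a run pass threads the seed through them — instead of
-- A's single loop testing three ifs per pair (objective: alternative, same cost).

-- shared meaning of Python's int(str(acc)+str(value)): PySem.Int.ofChars? over
-- PySem.Int.toChars; on inputs admitted by Pre_ the parse is 'some' (the .getD default
-- is never reached there)
def pvConcat (acc v : Int) : Int :=
  (PySem.Int.ofChars? (PySem.Int.toChars acc ++ PySem.Int.toChars v)).getD acc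

-- ===== PORT A =====
-- one loop iteration of A: three independent 'if' tests, in A's order
def pvStepA (acc : Int) (p : String × Int) : Int :=
  let a1 := if p.1 = "+" then acc + p.2 else acc
  let a2 := if p.1 = "*" then a1 * p.2 else a1
  if p.1 = "||" then pvConcat a2 p.2 else a2

def permutation_calc (values : List Int) (operator_perm : List String) : Int :=
  -- values[0]: IndexError on [] is excluded by Pre_
  let calc0 : Int := PySem.List.pyGetD values 0 0
  (List.zip operator_perm (PySem.List.slice values (some 1) none)).foldl pvStepA calc0

-- ===== PORT B =====
-- B's compile pass: elif dispatch appending a closure (or nothing) per pair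
def pvCompileStep (steps : List (Int → Int)) (p : String × Int) : List (Int → Int) :=
  if p.1 = "+" then steps ++ [fun acc => acc + p.2]
  else if p.1 = "*" then steps ++ [fun acc => acc * p.2]
  else if p.1 = "||" then steps ++ [fun acc => pvConcat acc p.2]
  else steps

def permutation_calc_alt (values : List Int) (operator_perm : List String) : Int :=
  let steps : List (Int → Int) :=
    (List.zip operator_perm (PySem.List.slice values (some 1) none)).foldl pvCompileStep []
  -- run pass: acc = values[0]; for step in steps: acc = step(acc)
  steps.foldl (fun acc step => step acc) (PySem.List.pyGetD values 0 0)

-- ===== PRECONDITION & SPEC =====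
-- Pre_ excludes exactly the inputs on which Python A raises: empty values (IndexError on
-- values[0]) and a '||' step paired with a negative value (int(str(acc)+str(v)) ValueError).
def Pre_permutation_calc (values : List Int) (operator_perm : List String) : Prop :=
  values ≠ [] ∧ ∀ p ∈ List.zip operator_perm values.tail, p.1 = "||" → 0 ≤ p.2
instance (values : List Int) (operator_perm : List String) : Decidable (Pre_permutation_calc values operator_perm) := by unfold Pre_permutation_calc; infer_instance

def pvWitness_permutation_calc : List Int × List String := ([190, 10, 19], ["*", "||"])

def Spec_permutation_calc (values : List Int) (operator_perm : List String) (out : Int) : Prop := out = permutation_calc_alt values operator_perm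
instance (values : List Int) (operator_perm : List String) (out : Int) : Decidable (Spec_permutation_calc values operator_perm out) := by unfold Spec_permutation_calc; infer_instance

-- ===== CLAIM (what is proved, stated in full; the proofs are below) =====
def Claim_equal_permutation_calc : Prop := ∀ (values : List Int) (operator_perm : List String), Dom_permutation_calc values operator_perm → Pre_permutation_calc values operator_perm → Spec_permutation_calc values operator_perm (permutation_calc values operator_perm)

-- ===== LEMMAS AND PROOFS =====

-- the closure B compiles for a pair computes exactly A's three-if step
-- (an operator string matches at most one of '+', '*', '||')
lemma pvRun_compileStep (steps : List (Int → Int)) (p : String × Int) (a : Int) :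
    (pvCompileStep steps p).foldl (fun acc step => step acc) a
      = pvStepA (steps.foldl (fun acc step => step acc) a) p := by
  obtain ⟨op, v⟩ := p
  simp only [pvCompileStep, pvStepA]
  by_cases h1 : op = "+" <;> by_cases h2 : op = "*" <;> by_cases h3 : op = "||" <;>
    simp_all [List.foldl_append]

-- running the compiled closure list is A's fold over the pairs
lemma pvRun_compile (ps : List (String × Int)) :
    ∀ (steps : List (Int → Int)) (a : Int),
      (ps.foldl pvCompileStep steps).foldl (fun acc step => step acc) a
        = ps.foldl pvStepA (steps.foldl (fun acc step => step acc) a) := by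
  induction ps with
  | nil => intro steps a; rfl
  | cons p t ih =>
    intro steps a
    simp only [List.foldl_cons, ih, pvRun_compileStep]

-- ===== VERDICT (by name: the statement is the Claim_ definition above) =====
theorem permutation_calc_spec : Claim_equal_permutation_calc := by
  intro values operator_perm _hdom _hpre
  unfold Spec_permutation_calc permutation_calc permutation_calc_alt
  rw [pvRun_compile]
  rfl
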